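-- pv_equiv track=rewrite | github.com/iamstevedavis/covid-passport-inspector | main.py | parse_jwt
-- ===== SOURCE A (Python) =====
-- def parse_jwt(qr_data):
--     """Parse a jwt out of the qr data that comes in as a base64 string
--
--     Args:
--         qr_data (string): A base64 string
--
--     Returns:
--         string: A deflate encoded jwt
--     """
--     jwt = ""
--     previousChar = None
--     for element in qr_data:
--         if str.isdigit(element):
--             if previousChar is not None:
--                 jwt += str(chr(int(previousChar + element) + 45))
--                 previousChar = None
--             else:
--                 previousChar = element
--         if not element:
--             break
--     return jwt
-- ===== SOURCE B (Python) =====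
-- def parse_jwt(qr_data):
--     """Parse a jwt out of the qr data that comes in as a base64 string.
--
--     Same result as A, computed differently: first collect all digit
--     characters, then consume them two at a time (an unpaired trailing
--     digit is dropped), instead of A's single pass with a toggle state.
--     """
--     digits = [c for c in qr_data if c.isdigit()]
--     out = []
--     while len(digits) >= 2:
--         out.append(chr(int(digits[0] + digits[1]) + 45))
--         digits = digits[2:]
--     return ''.join(out)
-- ===== Notes on version B (the rewrite author's own statement) =====
-- stated objective: simpler
-- what changed: Replaces A's single pass with a previousChar toggle (and a dead 'if not element: break') by a plain filter of the digit characters followed by a loop consuming them two at a time.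
import Mathlib
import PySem

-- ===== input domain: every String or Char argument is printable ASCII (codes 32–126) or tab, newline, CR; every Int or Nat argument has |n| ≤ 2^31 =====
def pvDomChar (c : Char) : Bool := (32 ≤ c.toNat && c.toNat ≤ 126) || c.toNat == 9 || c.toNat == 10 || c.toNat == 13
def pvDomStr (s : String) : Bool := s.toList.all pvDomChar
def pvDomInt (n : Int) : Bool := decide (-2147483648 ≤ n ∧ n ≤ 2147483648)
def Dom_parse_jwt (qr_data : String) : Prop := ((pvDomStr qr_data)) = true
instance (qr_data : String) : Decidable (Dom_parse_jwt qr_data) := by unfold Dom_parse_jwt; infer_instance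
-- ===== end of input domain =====

-- B replaces A's one-pass previousChar-toggle by "filter the digits, then consume them in pairs" (simpler decomposition, same cost).

-- shared helper: chr(int(a + b) + 45) for two characters a, b (both Pythons contain this exact expression)
def pvPairChar (a b : Char) : Char :=
  Char.ofNat ((PySem.Int.ofChars? [a, b]).getD 0 + 45).toNat

-- ===== PORT A =====
-- one pass; state = (jwt so far, previousChar); the trailing 'if not element: break'
-- can never fire (a one-character string is never falsy), so it adds nothing to the state.
def parse_jwt (qr_data : String) : String :=
  let st := qr_data.toList.foldl
    (fun (st : List Char × Option Char) element =>
      if PySem.Chars.isdigit element then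
        match st.2 with
        | some previousChar => (st.1 ++ [pvPairChar previousChar element], none)
        | none => (st.1, some element)
      else st)
    ([], none)
  String.mk st.1

-- ===== PORT B =====
-- the while loop of Source B: consume the first two digits, append one char, continue on digits[2:]
def pvBLoop : List Char → List Char → List Char
  | a :: b :: rest, out => pvBLoop rest (out ++ [pvPairChar a b])
  | _, out => out

def parse_jwt_alt (qr_data : String) : String :=
  String.mk (pvBLoop (qr_data.toList.filter PySem.Chars.isdigit) [])

-- ===== PRECONDITION & SPEC =====
def Spec_parse_jwt (qr_data : String) (out : String) : Prop := out = parse_jwt_alt qr_data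
instance (qr_data : String) (out : String) : Decidable (Spec_parse_jwt qr_data out) := by unfold Spec_parse_jwt; infer_instance

-- ===== CLAIM (what is proved, stated in full; the proofs are below) =====
def Claim_equal_parse_jwt : Prop := ∀ (qr_data : String), Dom_parse_jwt qr_data → Spec_parse_jwt qr_data (parse_jwt qr_data)

-- ===== LEMMAS AND PROOFS =====

-- A's fold from any state equals B's pair loop on (pending digit ++ filtered rest),
-- with A's accumulated jwt as B's out accumulator.
theorem pv_fold_eq_bloop (l : List Char) :
    ∀ (acc : List Char) (p? : Option Char),
      (l.foldl
        (fun (st : List Char × Option Char) element =>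
          if PySem.Chars.isdigit element then
            match st.2 with
            | some previousChar => (st.1 ++ [pvPairChar previousChar element], none)
            | none => (st.1, some element)
          else st)
        (acc, p?)).1
      = pvBLoop ((p?.toList) ++ l.filter PySem.Chars.isdigit) acc := by
  induction l with
  | nil =>
    intro acc p?
    cases p? <;> simp [pvBLoop]
  | cons c l ih =>
    intro acc p?
    by_cases hc : PySem.Chars.isdigit c
    · cases p? with
      | none =>
        simp only [List.foldl_cons, hc, if_pos, List.filter_cons_of_pos hc]
        exact ih acc (some c)
      | some p =>
        simp only [List.foldl_cons, hc, if_pos, List.filter_cons_of_pos hc]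
        rw [ih (acc ++ [pvPairChar p c]) none]
        simp [pvBLoop]
    · simp only [List.foldl_cons, hc, List.filter_cons_of_neg (by simpa using hc)]
      exact ih acc p?

-- ===== VERDICT (by name: the statement is the Claim_ definition above) =====
theorem parse_jwt_spec : Claim_equal_parse_jwt := by
  intro qr_data _
  show parse_jwt qr_data = parse_jwt_alt qr_data
  unfold parse_jwt parse_jwt_alt
  simp only [pv_fold_eq_bloop qr_data.toList [] none, Option.toList_none, List.nil_append]
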